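-- pv_equiv track=rewrite | github.com/hlyvamariia-lang/lab3 | variant5/lab4.py | can_reach_one
-- ===== SOURCE A (Python) =====
-- def can_reach_one(n):
--     # Створюємо масив dp, де dp[i] = True якщо число i досяжне
--     dp = [False] * (n + 1)
--     dp[n] = True  # Починаємо з числа N
--
--     for i in range(n, 0, -1):
--         if dp[i]:
--             # Хід 1: відняти 3
--             if i - 3 >= 1:
--                 dp[i - 3] = True
--             # Хід 2: поділити на 2 (тільки якщо парне)
--             if i % 2 == 0:
--                 dp[i // 2] = True
--
--     return dp[1]
-- ===== SOURCE B (Python) =====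
-- def can_reach_one(n):
--     # Closed form: from n (>= 1) the moves "subtract 3" and "halve (if even)"
--     # preserve non-divisibility by 3, and any n not divisible by 3 can walk
--     # down to 1; so 1 is reachable exactly when n is not a multiple of 3.
--     return n % 3 != 0
-- ===== Notes on version B (the rewrite author's own statement) =====
-- stated objective: faster
-- what changed: Replaced the O(n) dynamic-programming sweep over a dp array by the O(1) closed form: 1 is reachable from n exactly when n is not divisible by 3.
-- outside the precondition, e.g. on can_reach_one(0): A raises IndexError, B returns False; on can_reach_one(-3): A raises IndexError, B returns False
import Mathlib
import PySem

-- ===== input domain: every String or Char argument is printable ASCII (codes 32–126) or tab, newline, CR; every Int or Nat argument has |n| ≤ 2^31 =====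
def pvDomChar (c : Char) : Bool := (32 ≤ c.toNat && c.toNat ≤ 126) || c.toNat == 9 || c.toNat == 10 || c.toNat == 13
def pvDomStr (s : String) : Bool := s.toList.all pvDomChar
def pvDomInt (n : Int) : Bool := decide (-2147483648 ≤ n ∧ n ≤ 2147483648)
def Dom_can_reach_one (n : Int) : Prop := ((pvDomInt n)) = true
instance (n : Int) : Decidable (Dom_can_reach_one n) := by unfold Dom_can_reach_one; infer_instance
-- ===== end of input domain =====

-- B replaces A's linear dp sweep by the closed form "n % 3 != 0" (same return value on every n ≥ 1).

-- ===== PORT A =====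
def can_reach_one (n : Int) : Bool :=
  let dp0 : List Bool := PySem.List.pyRepeat [false] (n + 1)
  let dp1 : List Bool := PySem.List.pySetD dp0 n true
  let dp : List Bool :=
    (PySem.List.pyRange n 0 (-1)).foldl
      (fun dp i =>
        if PySem.List.pyGetD dp i false = true then
          let dp2 := if 1 ≤ i - 3 then PySem.List.pySetD dp (i - 3) true else dp
          if PySem.Int.mod i 2 = 0 then PySem.List.pySetD dp2 (PySem.Int.floordiv i 2) true else dp2
        else dp)
      dp1
  PySem.List.pyGetD dp 1 false

-- ===== PORT B =====
def can_reach_one_alt (n : Int) : Bool :=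
  PySem.Int.mod n 3 != 0

-- ===== PRECONDITION & SPEC =====
-- Pre_ is exactly the inputs on which A returns: for n ≤ 0 the Python A raises IndexError (dp[n] or dp[1])
def Pre_can_reach_one (n : Int) : Prop := 1 ≤ n
instance (n : Int) : Decidable (Pre_can_reach_one n) := by unfold Pre_can_reach_one; infer_instance
def pvWitness_can_reach_one : Int := 5

def Spec_can_reach_one (n : Int) (out : Bool) : Prop := out = can_reach_one_alt n
instance (n : Int) (out : Bool) : Decidable (Spec_can_reach_one n out) := by unfold Spec_can_reach_one; infer_instance

-- ===== CLAIM (what is proved, stated in full; the proofs are below) =====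
def Claim_equal_can_reach_one : Prop := ∀ (n : Int), Dom_can_reach_one n → Pre_can_reach_one n → Spec_can_reach_one n (can_reach_one n)

-- ===== LEMMAS AND PROOFS =====

inductive RA (m : Nat) : Nat → Nat → Prop
  | start (k : Nat) : RA m k m
  | sub {k i : Nat} : RA m k i → k < i → 4 ≤ i → RA m k (i - 3)
  | half {k i : Nat} : RA m k i → k < i → i % 2 = 0 → RA m k (i / 2)

lemma RA_bounds {m k j : Nat} (hm : 1 ≤ m) (h : RA m k j) : 1 ≤ j ∧ j ≤ m := by
  induction h with
  | start => omega
  | @sub i h hlt h4 ih => omega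
  | @half i h hlt he ih => omega

lemma RA_up' {m k j : Nat} (h : RA m k j) :
    RA m (k+1) j ∨ (RA m (k+1) (k+1) ∧ ((4 ≤ k+1 ∧ j + 3 = k+1) ∨ ((k+1) % 2 = 0 ∧ 2 * j = k+1))) := by
  induction h with
  | start => exact Or.inl (RA.start (k+1))
  | @sub i h hlt h4 ih =>
    rcases ih with hi | ⟨hkk, hcase⟩
    · rcases Nat.lt_or_ge (k+1) i with hki | hik
      · exact Or.inl (RA.sub hi hki h4)
      · have : i = k + 1 := by omega
        subst this
        exact Or.inr ⟨hi, Or.inl ⟨h4, by omega⟩⟩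
    · omega
  | @half i h hlt he ih =>
    rcases ih with hi | ⟨hkk, hcase⟩
    · rcases Nat.lt_or_ge (k+1) i with hki | hik
      · exact Or.inl (RA.half hi hki he)
      · have : i = k + 1 := by omega
        subst this
        exact Or.inr ⟨hi, Or.inr ⟨he, by omega⟩⟩
    · omega

lemma RA_mono {m k k' j : Nat} (h : RA m k j) (hk : k' ≤ k) : RA m k' j := by
  induction h with
  | start => exact RA.start k'
  | @sub i h hlt h4 ih => exact RA.sub ih (by omega) h4
  | @half i h hlt he ih => exact RA.half ih (by omega) he

lemma RA_top {m j : Nat} (hm : 1 ≤ m) (h : RA m m j) : j = m := by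
  induction h with
  | start => rfl
  | @sub i h hlt h4 ih => have := RA_bounds hm h; omega
  | @half i h hlt he ih => have := RA_bounds hm h; omega

lemma RA_div3 {m j : Nat} (h : RA m 0 j) (hd : 3 ∣ m) : 3 ∣ j := by
  induction h with
  | start => exact hd
  | @sub i h hlt h4 ih => omega
  | @half i h hlt he ih => omega

lemma RA_trans {m j l : Nat} (h2 : RA j 0 l) (h1 : RA m 0 j) : RA m 0 l := by
  induction h2 with
  | start => exact h1
  | @sub i h hlt h4 ih => exact RA.sub ih hlt h4
  | @half i h hlt he ih => exact RA.half ih hlt he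

lemma reach_of_not_div : ∀ m : Nat, 1 ≤ m → ¬ (3 ∣ m) → RA m 0 1 := by
  intro m
  induction m using Nat.strong_induction_on with
  | _ m ih =>
    intro hm hd
    rcases Nat.lt_or_ge m 4 with h4 | h4
    · interval_cases m
      · exact RA.start 0
      · have := RA.half (m := 2) (RA.start 0) (by omega) (by omega)
        simpa using this
      · omega
    · have hsub : RA m 0 (m - 3) := RA.sub (RA.start 0) (by omega) (by omega)
      exact RA_trans (ih (m - 3) (by omega) (by omega) (by omega)) hsub

lemma RA_iff_not_div {m : Nat} (hm : 1 ≤ m) : RA m 0 1 ↔ ¬ (3 ∣ m) := by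
  constructor
  · intro h hd
    have := RA_div3 h hd
    omega
  · exact reach_of_not_div m hm

def stepN (dp : List Bool) (i : Nat) : List Bool :=
  if dp.getD i false = true then
    let dp2 := if 4 ≤ i then dp.set (i - 3) true else dp
    if i % 2 = 0 then dp2.set (i / 2) true else dp2
  else dp

def runN (dp : List Bool) : Nat → List Bool
  | 0 => dp
  | k + 1 => runN (stepN dp (k + 1)) k

lemma getD_set_lt (xs : List Bool) (i j : Nat) (v d : Bool) (hi : i < xs.length) :
    (xs.set i v).getD j d = if j = i then v else xs.getD j d := by
  simp only [List.getD, List.getElem?_set]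
  by_cases h : j = i
  · subst h; simp [hi]
  · simp [Ne.symm h, h]

lemma stepN_length (dp : List Bool) (i : Nat) : (stepN dp i).length = dp.length := by
  unfold stepN
  split_ifs <;> simp

lemma stepN_getD {m : Nat} (dp : List Bool) (hlen : dp.length = m + 1) (i j : Nat)
    (hi : i ≤ m) (hj : j ≤ m) :
    ((stepN dp i).getD j false = true ↔
      dp.getD j false = true ∨
        (dp.getD i false = true ∧ ((4 ≤ i ∧ j + 3 = i) ∨ (i % 2 = 0 ∧ 2 * j = i)))) := by
  unfold stepN
  by_cases hv : dp.getD i false = true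
  · rw [if_pos hv]
    by_cases he : i % 2 = 0 <;> by_cases h4 : 4 ≤ i <;>
      simp only [he, h4, if_pos, if_neg, not_false_iff, hv, true_and] <;>
      [skip; skip; skip; skip]
    · rw [getD_set_lt _ _ _ _ _ (by rw [List.length_set, hlen]; omega),
          getD_set_lt _ _ _ _ _ (by rw [hlen]; omega)]
      by_cases hj1 : j = i / 2 <;> by_cases hj2 : j = i - 3 <;> simp [hj1, hj2] <;> omega
    · rw [getD_set_lt _ _ _ _ _ (by rw [hlen]; omega)]
      by_cases hj1 : j = i / 2 <;> simp [hj1] <;> omega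
    · rw [getD_set_lt _ _ _ _ _ (by rw [hlen]; omega)]
      by_cases hj2 : j = i - 3 <;> simp [hj2] <;> omega
    · simp
  · rw [if_neg hv]
    tauto

lemma runN_invariant {m : Nat} (hm : 1 ≤ m) :
    ∀ (k : Nat) (dp : List Bool), k ≤ m → dp.length = m + 1 →
      (∀ j, j ≤ m → (dp.getD j false = true ↔ RA m k j)) →
      ((runN dp k).getD 1 false = true ↔ RA m 0 1) := by
  intro k
  induction k with
  | zero => intro dp _ _ hdp; exact hdp 1 hm
  | succ k ih =>
    intro dp hk hlen hdp
    refine ih (stepN dp (k + 1)) (by omega) (by rw [stepN_length, hlen]) ?_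
    intro j hj
    rw [stepN_getD dp hlen (k + 1) j hk hj, hdp j hj, hdp (k + 1) hk]
    constructor
    · rintro (h | ⟨hkk, ⟨h4, hj3⟩ | ⟨he, hj2⟩⟩)
      · exact RA_mono h (by omega)
      · have := RA.sub (RA_mono hkk (by omega : k ≤ k + 1)) (by omega) h4
        have hjv : j = k + 1 - 3 := by omega
        rw [hjv]; exact this
      · have := RA.half (RA_mono hkk (by omega : k ≤ k + 1)) (by omega) he
        have hjv : j = (k + 1) / 2 := by omega
        rw [hjv]; exact this
    · intro h
      exact RA_up' h

lemma runN_main {m : Nat} (hm : 1 ≤ m) :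
    ((runN ((List.replicate (m + 1) false).set m true) m).getD 1 false = true) ↔ ¬ (3 ∣ m) := by
  rw [← RA_iff_not_div hm]
  refine runN_invariant hm m _ le_rfl (by simp) ?_
  intro j hj
  rw [getD_set_lt _ _ _ _ _ (by simp)]
  constructor
  · intro h
    by_cases hjm : j = m
    · subst hjm; exact RA.start _
    · simp [hjm, List.getD] at h
  · intro h
    have := RA_top hm h
    simp [this]


lemma step_bridge (dp : List Bool) (k : Nat) (hk : 1 ≤ k) :
    (if PySem.List.pyGetD dp (k : Int) false = true then
        let dp2 := if 1 ≤ (k : Int) - 3 then PySem.List.pySetD dp ((k : Int) - 3) true else dp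
        if PySem.Int.mod (k : Int) 2 = 0 then PySem.List.pySetD dp2 (PySem.Int.floordiv (k : Int) 2) true else dp2
      else dp) = stepN dp k := by
  simp only [stepN]
  have hget : PySem.List.pyGetD dp (k : Int) false = dp.getD k false := by
    simp [PySem.List.pyGetD_natCast, List.getD]
  rw [hget]
  by_cases hv : dp.getD k false = true
  · rw [if_pos hv, if_pos hv]
    have hccond : (1 ≤ (k : Int) - 3) = (4 ≤ k) := by
      simp; constructor <;> intro h <;> omega
    have hset3 : (4 ≤ k) → PySem.List.pySetD dp ((k : Int) - 3) true = dp.set (k - 3) true := by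
      intro h4
      have : ((k : Int) - 3) = ((k - 3 : Nat) : Int) := by omega
      rw [this, PySem.List.pySetD_natCast]
    have hmod : (PySem.Int.mod (k : Int) 2 = 0) = (k % 2 = 0) := by
      rw [show ((2:Int) = ((2:Nat):Int)) from rfl, PySem.Int.mod_natCast]
      simp
      omega
    have hdiv : PySem.Int.floordiv (k : Int) 2 = ((k / 2 : Nat) : Int) := by
      rw [show ((2:Int) = ((2:Nat):Int)) from rfl, PySem.Int.floordiv_natCast]
    by_cases h4 : 4 ≤ k
    · rw [if_pos (by omega : (1:Int) ≤ (k:Int) - 3), if_pos h4, hset3 h4]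
      by_cases he : k % 2 = 0
      · rw [if_pos (by rw [hmod]; exact he), if_pos he, hdiv, PySem.List.pySetD_natCast]
      · rw [if_neg (by rw [hmod]; exact he), if_neg he]
    · rw [if_neg (by omega : ¬ (1:Int) ≤ (k:Int) - 3), if_neg h4]
      by_cases he : k % 2 = 0
      · rw [if_pos (by rw [hmod]; exact he), if_pos he, hdiv, PySem.List.pySetD_natCast]
      · rw [if_neg (by rw [hmod]; exact he), if_neg he]
  · rw [if_neg hv, if_neg hv]

lemma fold_bridge : ∀ (k : Nat) (dp : List Bool),
    (PySem.List.pyRange (k : Int) 0 (-1)).foldl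
      (fun dp i =>
        if PySem.List.pyGetD dp i false = true then
          let dp2 := if 1 ≤ i - 3 then PySem.List.pySetD dp (i - 3) true else dp
          if PySem.Int.mod i 2 = 0 then PySem.List.pySetD dp2 (PySem.Int.floordiv i 2) true else dp2
        else dp) dp = runN dp k := by
  intro k
  induction k with
  | zero =>
    intro dp
    rw [PySem.List.pyRange_neg_one_eq_nil (by simp)]
    rfl
  | succ k ih =>
    intro dp
    rw [PySem.List.pyRange_neg_one_cons (by positivity)]
    rw [List.foldl_cons]
    have : ((k + 1 : Nat) : Int) - 1 = (k : Nat) := by push_cast; ring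
    rw [this, step_bridge dp (k + 1) (by omega)]
    exact ih (stepN dp (k + 1))

lemma can_reach_one_closed_form (n : Int) (hn : 1 ≤ n) :
    can_reach_one n = (PySem.Int.mod n 3 != 0) := by
  obtain ⟨m, rfl⟩ : ∃ m : Nat, n = (m : Int) := ⟨n.toNat, by omega⟩
  have hm : 1 ≤ m := by omega
  unfold can_reach_one
  simp only []
  have hrep : PySem.List.pyRepeat [false] ((m : Int) + 1) = List.replicate (m + 1) false := by
    rw [PySem.List.pyRepeat_singleton]
    congr 1
    try omega
  have hinit : PySem.List.pySetD (List.replicate (m + 1) false) (m : Int) true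
      = (List.replicate (m + 1) false).set m true := by
    rw [PySem.List.pySetD_natCast]
  rw [hrep, hinit, fold_bridge m]
  have h1 : PySem.List.pyGetD (runN ((List.replicate (m + 1) false).set m true) m) (1 : Int) false
      = (runN ((List.replicate (m + 1) false).set m true) m).getD 1 false := by
    rw [show ((1:Int) = ((1:Nat):Int)) from rfl, PySem.List.pyGetD_natCast]
    try simp [List.getD]
  rw [h1]
  have hmod3 : (PySem.Int.mod (m : Int) 3 != 0) = true ↔ ¬ (3 ∣ m) := by
    rw [show ((3:Int) = ((3:Nat):Int)) from rfl, PySem.Int.mod_natCast]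
    simp [bne_iff_ne]
    omega
  rw [Bool.eq_iff_iff, runN_main hm, hmod3]

-- ===== VERDICT (by name: the statement is the Claim_ definition above) =====
theorem can_reach_one_spec : Claim_equal_can_reach_one := by
  intro n _ hpre
  unfold Spec_can_reach_one can_reach_one_alt
  exact can_reach_one_closed_form n hpre
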